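-- pv_equiv track=rewrite | github.com/hyperion-rt/hyperion | hyperion/grid/yt2_wrappers.py | level_list
-- ===== SOURCE A (Python) =====
-- def level_list(refined, i=0, level=0):
--     if refined[i]:
--         levels = [level]
--         for s in range(8):
--             l, i = level_list(refined, i=i + 1, level=level + 1)
--             levels = levels + l
--         return levels, i
--     else:
--         return [], i
-- ===== SOURCE B (Python) =====
-- def level_list(refined, i=0, level=0):
--     levels = []
--     remaining = []
--     idx = i
--     while True:
--         if refined[idx]:
--             levels.append(level + len(remaining))
--             remaining.append(8)
--         else:
--             while remaining and remaining[-1] == 1: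
--                 remaining.pop()
--             if not remaining:
--                 return levels, idx
--             remaining[-1] -= 1
--         idx += 1
-- ===== Notes on version B (the rewrite author's own statement) =====
-- stated objective: alternative
-- what changed: Replaces A's 8-way recursion with a single iterative forward scan that keeps an explicit stack of pending-children counters, deriving each node's depth from the stack height.
import Mathlib
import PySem

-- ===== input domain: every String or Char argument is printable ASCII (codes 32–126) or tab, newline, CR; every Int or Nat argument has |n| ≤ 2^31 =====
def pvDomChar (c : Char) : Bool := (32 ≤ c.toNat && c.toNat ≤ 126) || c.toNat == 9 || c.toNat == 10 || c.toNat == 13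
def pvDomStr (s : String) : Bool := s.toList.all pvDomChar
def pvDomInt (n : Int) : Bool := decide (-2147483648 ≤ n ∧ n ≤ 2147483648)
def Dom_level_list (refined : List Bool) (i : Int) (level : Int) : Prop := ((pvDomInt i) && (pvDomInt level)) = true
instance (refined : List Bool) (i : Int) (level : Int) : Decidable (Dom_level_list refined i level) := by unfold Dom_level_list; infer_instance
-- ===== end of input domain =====

-- B replaces A's recursion by a single iterative forward scan with an explicit stack of
-- pending-children counters (same return value; objective: alternative decomposition).

-- ===== PORT A =====
-- A's recursion, with fuel: `none` models Python's IndexError (refined[i] out of range).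
-- On any non-raising run the traversal reads consecutive indices starting at i ≥ -len,
-- so 2*len+2 units of fuel are never exhausted (proved below); fuel is not a size bound.
-- The `for s in range(8)` loop is the foldl over List.range 8 with state (levels, i).
def levelListA (refined : List Bool) : Nat → Int → Int → Option (List Int × Int)
  | 0, _, _ => none
  | f + 1, i, level =>
    match PySem.List.pyGet? refined i with
    | none => none                                   -- IndexError
    | some true =>
        (List.range 8).foldl
          (fun st _ =>
            match st with
            | none => none
            | some (levels, i) =>
              match levelListA refined f (i + 1) (level + 1) with
              | none => none
              | some (l, i') => some (levels ++ l, i'))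
          (some ([level], i))
    | some false => some ([], i)

def level_list (refined : List Bool) (i : Int) (level : Int) : List Int × Int :=
  (levelListA refined (2 * refined.length + 2) i level).getD ([], 0)

-- ===== PORT B =====
-- `while remaining and remaining[-1] == 1: remaining.pop()` (stack top kept at the head)
def popOnes : List Int → List Int
  | [] => []
  | c :: rest => if c = 1 then popOnes rest else c :: rest

-- the `while True` loop of B, with fuel: `none` models Python's IndexError; the loop
-- reads consecutive indices, so fuel 2*len+2 is never exhausted (proved below).
def levelListB (refined : List Bool) : Nat → Int → List Int → List Int → Int → Option (List Int × Int)
  | 0, _, _, _, _ => none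
  | fuel + 1, level, levels, rem, idx =>
    match PySem.List.pyGet? refined idx with
    | none => none                                   -- IndexError
    | some true =>
        levelListB refined fuel level (levels ++ [level + rem.length]) (8 :: rem) (idx + 1)
    | some false =>
        match popOnes rem with
        | [] => some (levels, idx)
        | c :: rest => levelListB refined fuel level levels ((c - 1) :: rest) (idx + 1)

def level_list_alt (refined : List Bool) (i : Int) (level : Int) : List Int × Int :=
  (levelListB refined (2 * refined.length + 2) level [] [] i).getD ([], 0)

-- ===== PRECONDITION & SPEC =====
-- 'Pre' = the octree flattened from index i is complete inside the list: a counter of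
-- still-pending nodes, started at 1, reaches 0 while indexing stays in the valid range.
-- Exactly the inputs on which Python A (and B) returns instead of raising IndexError.
-- (The fuel (len-i).toNat+1 bounds the indices i, i+1, … the scan can read before
-- leaving the range, so it is never exhausted; it is not a size restriction.)
def scanOkF (refined : List Bool) : Nat → Int → Nat → Bool
  | 0, _, c => c = 0
  | f + 1, idx, c =>
    if c = 0 then true
    else
      match PySem.List.pyGet? refined idx with
      | none => false
      | some true => scanOkF refined f (idx + 1) (c + 7)
      | some false => scanOkF refined f (idx + 1) (c - 1)

def Pre_level_list (refined : List Bool) (i : Int) (level : Int) : Prop :=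
  scanOkF refined (((refined.length : Int) - i).toNat + 1) i 1 = true

instance (refined : List Bool) (i : Int) (level : Int) :
    Decidable (Pre_level_list refined i level) := by
  unfold Pre_level_list; infer_instance

def pvWitness_level_list : List Bool × Int × Int :=
  ([true, false, false, false, false, false, false, false, false], 0, 0)

def Spec_level_list (refined : List Bool) (i : Int) (level : Int) (out : List Int × Int) : Prop := out = level_list_alt refined i level
instance (refined : List Bool) (i : Int) (level : Int) (out : List Int × Int) : Decidable (Spec_level_list refined i level out) := by unfold Spec_level_list; infer_instance

-- ===== CLAIM (what is proved, stated in full; the proofs are below) =====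
def Claim_equal_level_list : Prop := ∀ (refined : List Bool) (i : Int) (level : Int), Dom_level_list refined i level → Pre_level_list refined i level → Spec_level_list refined i level (level_list refined i level)

-- ===== LEMMAS AND PROOFS =====

theorem inRange_of_pyGet?_some {α : Type} {xs : List α} {i : Int} {x : α}
    (h : PySem.List.pyGet? xs i = some x) : -(xs.length : Int) ≤ i ∧ i < xs.length := by
  have hin : ¬ PySem.List.pyGet? xs i = none := by simp [h]
  rw [PySem.List.pyGet?_eq_none_iff] at hin
  push_neg at hin
  unfold PySem.Raise.InRange at hin
  exact hin

-- A's children loop, re-expressed with the count k of remaining iterations explicit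
def aChildrenK (refined : List Bool) (f : Nat) (level : Int) : Nat → Int → List Int → Option (List Int × Int)
  | 0, j, levels => some (levels, j)
  | k + 1, j, levels =>
    match levelListA refined f (j + 1) (level + 1) with
    | none => none
    | some (l, j₁) => aChildrenK refined f level k j₁ (levels ++ l)

theorem foldStep_none (refined : List Bool) (f : Nat) (level : Int) :
    ∀ (ts : List Nat),
      (ts.foldl
        (fun st _ =>
          match st with
          | none => none
          | some (levels, i) =>
            match levelListA refined f (i + 1) (level + 1) with
            | none => none
            | some (l, i') => some (levels ++ l, i'))
        (none : Option (List Int × Int))) = none := by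
  intro ts
  induction ts with
  | nil => rfl
  | cons t ts ih => simpa using ih

theorem fold_eq (refined : List Bool) (f : Nat) (level : Int) :
    ∀ (ts : List Nat) (j : Int) (levels : List Int),
      (ts.foldl
        (fun st _ =>
          match st with
          | none => none
          | some (levels, i) =>
            match levelListA refined f (i + 1) (level + 1) with
            | none => none
            | some (l, i') => some (levels ++ l, i'))
        (some (levels, j))) = aChildrenK refined f level ts.length j levels := by
  intro ts
  induction ts with
  | nil => intro j levels; simp [aChildrenK]
  | cons t ts ih =>
    intro j levels
    rw [List.foldl_cons]
    rcases hsub : levelListA refined f (j + 1) (level + 1) with _ | ⟨l, j₁⟩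
    · simp only [hsub]
      rw [foldStep_none]
      simp [aChildrenK, hsub]
    · simp only [hsub]
      rw [ih j₁ (levels ++ l)]
      simp [aChildrenK, hsub]

-- a successful A-call ends at an index r with i ≤ r < len (the last index it read)
theorem a_mono (refined : List Bool) :
    ∀ (f : Nat) (i L : Int) (ls : List Int) (r : Int),
      levelListA refined f i L = some (ls, r) → i ≤ r ∧ r < (refined.length : Int) := by
  intro f
  induction f with
  | zero => intro i L ls r h; simp [levelListA] at h
  | succ f ih =>
    intro i L ls r h
    rw [levelListA] at h
    rcases hget : PySem.List.pyGet? refined i with _ | b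
    · rw [hget] at h; simp at h
    · have hrange := inRange_of_pyGet?_some hget
      rcases b with _ | _
      · rw [hget] at h; simp at h
        obtain ⟨_, hr⟩ := h
        omega
      · rw [hget] at h
        simp only [] at h
        rw [fold_eq] at h
        simp only [List.length_range] at h
        have hc : ∀ (k : Nat) (j : Int) (levels ls : List Int) (r : Int), 1 ≤ k →
            aChildrenK refined f L k j levels = some (ls, r) →
            j < r ∧ r < (refined.length : Int) := by
          intro k
          induction k with
          | zero => intro _ _ _ _ hk; omega
          | succ k ihk =>
            intro j levels ls r _ hch
            rw [aChildrenK] at hch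
            rcases hsub : levelListA refined f (j + 1) (L + 1) with _ | ⟨l, j₁⟩
            · rw [hsub] at hch; simp at hch
            · rw [hsub] at hch
              simp only [] at hch
              have hm := ih (j + 1) (L + 1) l j₁ hsub
              rcases k with _ | k
              · rw [aChildrenK] at hch
                simp at hch
                omega
              · have := ihk j₁ (levels ++ l) ls r (by omega) hch
                omega
        have := hc 8 i [L] ls r (by omega) h
        omega

-- and a successful children loop with k ≥ 1 iterations left moves strictly forward
theorem ack_mono (refined : List Bool) (f : Nat) (L : Int) :
    ∀ (k : Nat) (j : Int) (levels ls : List Int) (r : Int), 1 ≤ k →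
      aChildrenK refined f L k j levels = some (ls, r) →
      j < r ∧ r < (refined.length : Int) := by
  intro k
  induction k with
  | zero => intro _ _ _ _ hk; omega
  | succ k ihk =>
    intro j levels ls r _ hch
    rw [aChildrenK] at hch
    rcases hsub : levelListA refined f (j + 1) (L + 1) with _ | ⟨l, j₁⟩
    · rw [hsub] at hch; simp at hch
    · rw [hsub] at hch
      simp only [] at hch
      have hm := a_mono refined f (j + 1) (L + 1) l j₁ hsub
      rcases k with _ | k
      · rw [aChildrenK] at hch
        simp at hch
        omega
      · have := ihk j₁ (levels ++ l) ls r (by omega) hch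
        omega

-- MAIN: an A-subtree at i whose node sits at depth L = level + rem.length is, on B's
-- side, one stretch of the scan from i consuming (r-i)+1 fuel; afterwards the stack
-- closes (popOnes) and either the run ends at r or the loop resumes at r+1.
theorem b_simulates_a (refined : List Bool) :
    ∀ (f : Nat) (i L : Int) (ls : List Int) (r : Int),
      levelListA refined f i L = some (ls, r) →
      ∀ (g : Nat) (acc rem : List Int) (level : Int), L = level + rem.length →
        levelListB refined (g + ((r - i).toNat + 1)) level acc rem i =
          (match popOnes rem with
           | [] => some (acc ++ ls, r)
           | c :: rest => levelListB refined g level (acc ++ ls) ((c - 1) :: rest) (r + 1)) := by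
  intro f
  induction f with
  | zero => intro i L ls r h; simp [levelListA] at h
  | succ f ih =>
    intro i L ls r h g acc rem level hL
    rw [levelListA] at h
    rcases hget : PySem.List.pyGet? refined i with _ | b
    · rw [hget] at h; simp at h
    · rcases b with _ | _
      · -- leaf: refined[i] = False
        rw [hget] at h; simp at h
        obtain ⟨hls, hr⟩ := h
        subst hls; subst hr
        have hf1 : g + ((i - i).toNat + 1) = g + 1 := by omega
        rw [hf1, levelListB, hget]
        rcases hpop : popOnes rem with _ | ⟨c, rest⟩ <;> simp [hpop]
      · -- internal: refined[i] = True
        rw [hget] at h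
        simp only [] at h
        rw [fold_eq] at h
        simp only [List.length_range] at h
        have child : ∀ (k : Nat) (j : Int) (levels ls : List Int) (r : Int),
            aChildrenK refined f L k j levels = some (ls, r) → 1 ≤ k →
            levelListB refined (g + (r - j).toNat) level (acc ++ levels) ((k : Int) :: rem) (j + 1) =
              (match popOnes rem with
               | [] => some (acc ++ ls, r)
               | c :: rest => levelListB refined g level (acc ++ ls) ((c - 1) :: rest) (r + 1)) := by
          intro k
          induction k with
          | zero => intro _ _ _ _ _ hk; omega
          | succ k ihk =>
            intro j levels ls r hch _
            rw [aChildrenK] at hch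
            rcases hsub : levelListA refined f (j + 1) (L + 1) with _ | ⟨l, j₁⟩
            · rw [hsub] at hch; simp at hch
            · rw [hsub] at hch
              simp only [] at hch
              have hmono := a_mono refined f (j + 1) (L + 1) l j₁ hsub
              rcases k with _ | k
              · -- last child: counter 1 gets popped together with finished ancestors
                push_cast
                rw [aChildrenK] at hch
                simp at hch
                obtain ⟨hls, hr⟩ := hch
                have hfe : g + (r - j).toNat = g + ((j₁ - (j + 1)).toNat + 1) := by omega
                rw [hfe]
                have hL' : L + 1 = level + ((1 : Int) :: rem).length := by
                  simp; omega
                have hmain := ih (j + 1) (L + 1) l j₁ hsub g (acc ++ levels)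
                    ((1 : Int) :: rem) level hL'
                rw [hmain]
                rcases hpop : popOnes rem with _ | ⟨c, rest⟩ <;>
                  simp [popOnes, hpop, ← hls, ← hr, List.append_assoc]
              · -- counter k+2 ≥ 2: just decrement and continue with the next child
                push_cast
                have hj1r : j₁ ≤ r :=
                  le_of_lt (ack_mono refined f L (k + 1) j₁ (levels ++ l) ls r (by omega) hch).1
                have hfe : g + (r - j).toNat =
                    (g + (r - j₁).toNat) + ((j₁ - (j + 1)).toNat + 1) := by omega
                rw [hfe]
                have hL' : L + 1 = level + ((((k : Nat) : Int) + 1 + 1) :: rem).length := by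
                  simp; omega
                have hmain := ih (j + 1) (L + 1) l j₁ hsub (g + (r - j₁).toNat) (acc ++ levels)
                    ((((k : Nat) : Int) + 1 + 1) :: rem) level hL'
                rw [hmain]
                have hpop : popOnes ((((k : Nat) : Int) + 1 + 1) :: rem) =
                    (((k : Nat) : Int) + 1 + 1) :: rem := by
                  simp [popOnes]; omega
                rw [hpop]
                have hdec : (((k : Nat) : Int) + 1 + 1 - 1) = ((k : Nat) : Int) + 1 := by omega
                simp only [hdec]
                have hres := ihk j₁ (levels ++ l) ls r hch (by omega)
                push_cast at hres
                simpa [List.append_assoc] using hres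
        have hstep := child 8 i [L] ls r h (by omega)
        have hf1 : g + ((r - i).toNat + 1) = (g + (r - i).toNat) + 1 := by omega
        rw [hf1, levelListB, hget]
        have hLlvl : level + (rem.length : Int) = L := by omega
        rw [hLlvl]
        simpa using hstep

-- SUFF: if the pending-counter scan from (i, c) completes, A's recursion at i succeeds
-- given enough fuel, ends at some r ≥ i, and the scan resumes at (r+1, c-1) having
-- consumed exactly (r-i)+1 units of scan fuel.
theorem a_succeeds (refined : List Bool) :
    ∀ (fa : Nat) (i L : Int) (c : Nat) (fs : Nat), 1 ≤ c →
      scanOkF refined fs i c = true →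
      ((refined.length : Int) - i).toNat + 1 ≤ fa →
      ∃ ls r, levelListA refined fa i L = some (ls, r) ∧ i ≤ r ∧
        scanOkF refined (fs - ((r - i).toNat + 1)) (r + 1) (c - 1) = true := by
  intro fa
  induction fa with
  | zero => intro i L c fs hc hscan hf; omega
  | succ fa ih =>
    intro i L c fs hc hscan hf
    rcases fs with _ | fs
    · rw [scanOkF] at hscan; simp at hscan; omega
    · rw [scanOkF] at hscan
      rw [if_neg (by omega)] at hscan
      rcases hget : PySem.List.pyGet? refined i with _ | b
      · rw [hget] at hscan; simp at hscan
      · have hrange := inRange_of_pyGet?_some hget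
        rcases b with _ | _
        · -- leaf
          rw [hget] at hscan
          refine ⟨[], i, by rw [levelListA, hget], le_refl i, ?_⟩
          have hfs : fs + 1 - ((i - i).toNat + 1) = fs := by omega
          rw [hfs]
          exact hscan
        · -- internal
          rw [hget] at hscan
          have child : ∀ (k : Nat) (j : Int) (levels : List Int) (m : Nat) (fs' : Nat),
              scanOkF refined fs' (j + 1) (k + m) = true →
              ((refined.length : Int) - (j + 1)).toNat + 1 ≤ fa → i ≤ j →
              ∃ ls r, aChildrenK refined fa L k j levels = some (ls, r) ∧ j ≤ r ∧
                scanOkF refined (fs' - (r - j).toNat) (r + 1) m = true := by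
            intro k
            induction k with
            | zero =>
              intro j levels m fs' hs _ _
              refine ⟨levels, j, by rw [aChildrenK], le_refl j, ?_⟩
              have hfs : fs' - (j - j).toNat = fs' := by omega
              rw [hfs]
              simpa using hs
            | succ k ihk =>
              intro j levels m fs' hs hfj hij
              obtain ⟨l, r₁, hsub, hjr, hs₁⟩ :=
                ih (j + 1) (L + 1) (k + 1 + m) fs' (by omega) hs hfj
              have hs₁' : scanOkF refined (fs' - ((r₁ - (j + 1)).toNat + 1)) (r₁ + 1) (k + m) = true := by
                simpa using hs₁
              obtain ⟨ls, r, hch, hr, hsr⟩ :=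
                ihk r₁ (levels ++ l) m (fs' - ((r₁ - (j + 1)).toNat + 1)) hs₁' (by omega) (by omega)
              refine ⟨ls, r, by rw [aChildrenK, hsub]; exact hch, by omega, ?_⟩
              have hfs : fs' - ((r₁ - (j + 1)).toNat + 1) - (r - r₁).toNat = fs' - (r - j).toNat := by
                omega
              rw [hfs] at hsr
              exact hsr
          have hscan' : scanOkF refined fs (i + 1) (8 + (c - 1)) = true := by
            have h8 : 8 + (c - 1) = c + 7 := by omega
            rw [h8]; exact hscan
          obtain ⟨ls, r, hch, hr, hsr⟩ := child 8 i [L] (c - 1) fs hscan' (by omega) (le_refl i)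
          refine ⟨ls, r, ?_, by omega, ?_⟩
          · rw [levelListA, hget]
            simp only []
            rw [fold_eq]
            simpa using hch
          · have hfs : fs + 1 - ((r - i).toNat + 1) = fs - (r - i).toNat := by omega
            rw [hfs]
            exact hsr

-- ===== VERDICT (by name: the statement is the Claim_ definition above) =====
theorem level_list_spec : Claim_equal_level_list := by
  intro refined i level _ hpre
  unfold Spec_level_list level_list level_list_alt
  unfold Pre_level_list at hpre
  have hpre2 := hpre
  rw [scanOkF] at hpre2
  rw [if_neg (by omega)] at hpre2
  -- the scan reads refined[i] first, so i is in range
  rcases hget : PySem.List.pyGet? refined i with _ | b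
  · rw [hget] at hpre2; simp at hpre2
  · have hrange := inRange_of_pyGet?_some hget
    obtain ⟨ls, r, hA, hir, _⟩ :=
      a_succeeds refined (2 * refined.length + 2) i level 1
        (((refined.length : Int) - i).toNat + 1) (le_refl 1) hpre (by omega)
    have hrlen := a_mono refined (2 * refined.length + 2) i level ls r hA
    have hfuel : 2 * refined.length + 2 =
        (2 * refined.length + 2 - ((r - i).toNat + 1)) + ((r - i).toNat + 1) := by omega
    have hB := b_simulates_a refined (2 * refined.length + 2) i level ls r hA
        (2 * refined.length + 2 - ((r - i).toNat + 1)) [] [] level (by simp)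
    rw [hA]
    rw [hfuel, hB]
    simp [popOnes]
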